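-- pv_equiv track=rewrite | github.com/ispringle/miscellanea | 2018/2/solution.py | tallyChars
-- ===== SOURCE A (Python) =====
-- from collections import Counter
--
-- def tallyChars(id):
-- 	counts = Counter()
-- 	twos = 0
-- 	threes = 0
-- 	for char in id:
-- 		counts[char] += 1
-- 	for count in counts:
-- 		if counts[count] == 2:
-- 			twos = 1
-- 		if counts[count] == 3:
-- 			threes = 1
-- 	return twos, threes
-- ===== SOURCE B (Python) =====
-- def _runs(s):
--     out = []
--     while s:
--         c = s[0]
--         k = 1
--         while k < len(s) and s[k] == c:
--             k += 1
--         out.append(k)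
--         s = s[k:]
--     return out
--
-- def tallyChars(id):
--     ns = _runs(sorted(id))
--     return (1 if 2 in ns else 0, 1 if 3 in ns else 0)
-- ===== Notes on version B (the rewrite author's own statement) =====
-- stated objective: alternative
-- what changed: Replaces the Counter hash-count plus a pass over its keys by sorting the string and scanning maximal equal-character runs, flagging run lengths 2 and 3.
import Mathlib
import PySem

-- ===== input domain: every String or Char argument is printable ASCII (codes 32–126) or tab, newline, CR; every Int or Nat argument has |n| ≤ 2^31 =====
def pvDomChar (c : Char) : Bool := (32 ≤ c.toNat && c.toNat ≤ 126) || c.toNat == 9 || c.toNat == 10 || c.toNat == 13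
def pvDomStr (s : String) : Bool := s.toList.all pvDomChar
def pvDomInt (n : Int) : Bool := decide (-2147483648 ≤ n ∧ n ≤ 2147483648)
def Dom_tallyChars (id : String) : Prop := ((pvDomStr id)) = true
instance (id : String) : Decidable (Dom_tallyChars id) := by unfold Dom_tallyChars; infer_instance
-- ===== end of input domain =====

-- B replaces A's Counter + key-pass by sort-then-scan of equal-character runs (alternative algorithm, not claimed faster).

-- ===== PORT A =====
def tallyChars (id : String) : Int × Int :=
  -- counts = Counter(); for char in id: counts[char] += 1
  let counts : PySem.Dict Char Int :=
    id.toList.foldl (fun d ch => d.insert ch (d.getD ch 0 + 1)) PySem.Dict.empty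
  -- for count in counts: if counts[count]==2: twos=1; if counts[count]==3: threes=1
  counts.keys.foldl
    (fun (p : Int × Int) k =>
      ((if counts.getD k 0 == 2 then 1 else p.1),
       (if counts.getD k 0 == 3 then 1 else p.2)))
    (0, 0)

-- ===== PORT B =====
-- _runs(s): scan maximal runs of equal adjacent elements, collecting their lengths
def pvRuns (s : List Char) : List Nat :=
  match s with
  | [] => []
  | c :: rest =>
    -- k = 1; while k < len(s) and s[k] == c: k += 1  — k = 1 + length of the leading run of c in rest
    ((rest.takeWhile (fun x => x == c)).length + 1) :: pvRuns (rest.dropWhile (fun x => x == c))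
termination_by s.length
decreasing_by
  simp only [List.length_cons]
  exact Nat.lt_succ_of_le (List.length_dropWhile_le _ _)

def tallyChars_alt (id : String) : Int × Int :=
  let ns := pvRuns (PySem.List.sorted id.toList (fun x => x) false)
  ((if 2 ∈ ns then 1 else 0), (if 3 ∈ ns then 1 else 0))

-- ===== PRECONDITION & SPEC =====
def Spec_tallyChars (id : String) (out : Int × Int) : Prop := out = tallyChars_alt id
instance (id : String) (out : Int × Int) : Decidable (Spec_tallyChars id out) := by unfold Spec_tallyChars; infer_instance

-- ===== CLAIM (what is proved, stated in full; the proofs are below) =====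
def Claim_equal_tallyChars : Prop := ∀ (id : String), Dom_tallyChars id → Spec_tallyChars id (tallyChars id)

-- ===== LEMMAS AND PROOFS =====

theorem pvRuns_cons (c : Char) (rest : List Char) :
    pvRuns (c :: rest)
    = ((rest.takeWhile (fun x => x == c)).length + 1)
      :: pvRuns (rest.dropWhile (fun x => x == c)) := by
  rw [pvRuns]

-- A's flag-setting fold over the keys
theorem flag_fold (cnt : Char → Int) (ks : List Char) (p : Int × Int) :
    ks.foldl (fun (p : Int × Int) k =>
      ((if cnt k == 2 then 1 else p.1), (if cnt k == 3 then 1 else p.2))) p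
    = ((if ∃ k ∈ ks, cnt k = 2 then 1 else p.1),
       (if ∃ k ∈ ks, cnt k = 3 then 1 else p.2)) := by
  induction ks generalizing p with
  | nil => simp
  | cons k t ih =>
    rw [List.foldl_cons, ih]
    refine Prod.ext ?_ ?_ <;> dsimp only <;>
      by_cases ht2 : ∃ x ∈ t, cnt x = 2 <;> by_cases ht3 : ∃ x ∈ t, cnt x = 3 <;>
      by_cases hk2 : cnt k = 2 <;> by_cases hk3 : cnt k = 3 <;>
      simp [ht2, ht3, hk2, hk3]

theorem dropWhile_head_false {p : Char → Bool} {l : List Char} {b : Char} {r : List Char}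
    (h : l.dropWhile p = b :: r) : p b = false := by
  induction l with
  | nil => simp at h
  | cons a t ih =>
    by_cases hp : p a
    · simp [hp] at h; exact ih h
    · simp [hp] at h
      rw [← h.1]
      simpa using hp

-- run lengths of a sorted list are exactly the multiplicities of its members
theorem mem_pvRuns_iff (s : List Char) (hs : s.Pairwise (· ≤ ·)) (n : Nat) :
    n ∈ pvRuns s ↔ ∃ c ∈ s, s.count c = n := by
  induction s using pvRuns.induct with
  | case1 => simp [pvRuns]
  | case2 c rest ih =>
    have hsplit : rest.takeWhile (fun x => x == c) ++ rest.dropWhile (fun x => x == c) = rest :=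
      List.takeWhile_append_dropWhile
    have hle : ∀ x ∈ rest, c ≤ x := (List.pairwise_cons.mp hs).1
    have htkc : ∀ x ∈ rest.takeWhile (fun x => x == c), x = c := by
      intro x hx
      have := List.mem_takeWhile_imp hx
      simpa using this
    have hdrsub : (rest.dropWhile (fun x => x == c)).Sublist rest := List.dropWhile_sublist _
    have hdrpair : (rest.dropWhile (fun x => x == c)).Pairwise (· ≤ ·) :=
      ((List.pairwise_cons.mp hs).2).sublist hdrsub
    have hcdr : c ∉ rest.dropWhile (fun x => x == c) := by
      intro hmem
      cases hdrcons : rest.dropWhile (fun x => x == c) with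
      | nil => rw [hdrcons] at hmem; simp at hmem
      | cons b r =>
        have hb : (fun x => x == c) b = false :=
          dropWhile_head_false (p := fun x => x == c) (l := rest) hdrcons
        have hbne : b ≠ c := by simpa using hb
        rw [hdrcons] at hmem
        rcases List.mem_cons.mp hmem with h | h
        · exact hbne h.symm
        · have h1 : b ≤ c := ((List.pairwise_cons.mp (hdrcons ▸ hdrpair)).1) c h
          have h2 : c ≤ b := hle b (hdrsub.mem (hdrcons ▸ List.mem_cons_self))
          exact hbne (le_antisymm h1 h2)
    have hcountc : (c :: rest).count c = (rest.takeWhile (fun x => x == c)).length + 1 := by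
      have h1 : (rest.takeWhile (fun x => x == c)).count c
          = (rest.takeWhile (fun x => x == c)).length := by
        rw [List.count_eq_length]
        intro b hb; exact (htkc b hb).symm
      have h2 : (rest.dropWhile (fun x => x == c)).count c = 0 := List.count_eq_zero.mpr hcdr
      have hrest : rest.count c = (rest.takeWhile (fun x => x == c)).length := by
        conv_lhs => rw [← hsplit]
        rw [List.count_append, h1, h2]
        omega
      rw [List.count_cons_self, hrest]
    have hcount' : ∀ x, x ≠ c →
        (c :: rest).count x = (rest.dropWhile (fun x => x == c)).count x := by
      intro x hx
      have h1 : (rest.takeWhile (fun x => x == c)).count x = 0 := by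
        rw [List.count_eq_zero]; intro hm; exact hx (htkc x hm)
      have hrest : rest.count x = (rest.dropWhile (fun x => x == c)).count x := by
        conv_lhs => rw [← hsplit]
        rw [List.count_append, h1, Nat.zero_add]
      rw [List.count_cons, hrest]
      simp [Ne.symm hx]
    have hmem' : ∀ x, x ∈ c :: rest ↔ x = c ∨ x ∈ rest.dropWhile (fun x => x == c) := by
      intro x
      have hmr : x ∈ rest ↔ x ∈ rest.takeWhile (fun x => x == c) ∨ x ∈ rest.dropWhile (fun x => x == c) := by
        conv_lhs => rw [← hsplit]
        exact List.mem_append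
      rw [List.mem_cons, hmr]
      constructor
      · rintro (h | h | h)
        · exact Or.inl h
        · exact Or.inl (htkc x h)
        · exact Or.inr h
      · rintro (h | h)
        · exact Or.inl h
        · exact Or.inr (Or.inr h)
    rw [pvRuns_cons, List.mem_cons, ih hdrpair]
    constructor
    · rintro (h | ⟨x, hx, hc⟩)
      · exact ⟨c, List.mem_cons_self, by rw [hcountc]; omega⟩
      · have hxc : x ≠ c := fun he => hcdr (he ▸ hx)
        exact ⟨x, (hmem' x).mpr (Or.inr hx), by rw [hcount' x hxc]; exact hc⟩
    · rintro ⟨x, hx, hc⟩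
      rcases (hmem' x).mp hx with he | hdrx
      · subst he; rw [hcountc] at hc; omega
      · right
        have hxc : x ≠ c := fun he => hcdr (he ▸ hdrx)
        exact ⟨x, hdrx, by rw [← hcount' x hxc]; exact hc⟩

-- ===== VERDICT (by name: the statement is the Claim_ definition above) =====
theorem tallyChars_spec : Claim_equal_tallyChars := by
  intro id _
  unfold Spec_tallyChars tallyChars tallyChars_alt
  have hperm : (PySem.List.sorted id.toList (fun x => x) false).Perm id.toList :=
    PySem.List.sorted_perm id.toList (fun x => x) false
  have hpair : (PySem.List.sorted id.toList (fun x => x) false).Pairwise (· ≤ ·) := by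
    have := PySem.List.sorted_pairwise (xs := id.toList) (key := fun x => x)
    simpa using this
  have hcnt : id.toList.foldl (fun d ch => d.insert ch (d.getD ch 0 + 1)) PySem.Dict.empty
      = PySem.Dict.counter id.toList :=
    PySem.Dict.foldl_insert_getD_add_one_eq_counter id.toList
  simp only [hcnt, flag_fold, PySem.Dict.keys_counter]
  have hex : ∀ n : Nat,
      ((∃ k ∈ PySem.Set.ofList id.toList, (PySem.Dict.counter id.toList).getD k 0 = (n : Int))
        ↔ n ∈ pvRuns (PySem.List.sorted id.toList (fun x => x) false)) := by
    intro n
    rw [mem_pvRuns_iff _ hpair n]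
    constructor
    · rintro ⟨k, hk, hv⟩
      refine ⟨k, hperm.mem_iff.mpr (by simpa [PySem.Set.mem_ofList] using hk), ?_⟩
      rw [hperm.count_eq]
      rw [PySem.Dict.getD_counter] at hv
      exact_mod_cast hv
    · rintro ⟨k, hk, hv⟩
      refine ⟨k, by simpa [PySem.Set.mem_ofList] using hperm.mem_iff.mp hk, ?_⟩
      rw [PySem.Dict.getD_counter]
      rw [hperm.count_eq] at hv
      exact_mod_cast hv
  have h2 := hex 2
  have h3 := hex 3
  norm_num at h2 h3 ⊢
  simp only [h2, h3]
  exact ⟨trivial, trivial⟩
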